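-- pv_equiv track=rewrite | github.com/Floriannue/CORApy | cora_python/g/functions/verbose/plot/set_default_values.py | set_default_values
-- ===== SOURCE A (Python) =====
-- from typing import List, Any, Optional
--
-- def set_default_values(defaults: List[Any], args: Optional[List[Any]] = None) -> List[Any]:
--     """
--     Set default values for function arguments
--
--     Args:
--         defaults: List of default values
--         args: Input arguments list (can be None or empty)
--
--     Returns:
--         List of processed values with defaults applied
--     """
--     if args is None:
--         args = []
--
--     # Convert to list if needed
--     if not isinstance(args, list):
--         args = list(args) if hasattr(args, '__iter__') else [args]
--
--     # Initialize result with defaults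
--     result = defaults.copy()
--
--     # Override with provided arguments
--     for i, arg in enumerate(args):
--         if i < len(result):
--             result[i] = arg
--         else:
--             result.append(arg)
--
--     return result
-- ===== SOURCE B (Python) =====
-- from typing import List, Any, Optional
--
-- def set_default_values(defaults: List[Any], args: Optional[List[Any]] = None) -> List[Any]:
--     if args is None:
--         args = []
--     if not isinstance(args, list):
--         args = list(args) if hasattr(args, '__iter__') else [args]
--     return list(args) + defaults[len(args):]
-- ===== Notes on version B (the rewrite author's own statement) =====
-- stated objective: simpler
-- what changed: Replaces the enumerate loop with per-index assignment/append by the closed form list(args) + defaults[len(args):] (concatenation of the args prefix with the remaining defaults tail).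
import Mathlib
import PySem

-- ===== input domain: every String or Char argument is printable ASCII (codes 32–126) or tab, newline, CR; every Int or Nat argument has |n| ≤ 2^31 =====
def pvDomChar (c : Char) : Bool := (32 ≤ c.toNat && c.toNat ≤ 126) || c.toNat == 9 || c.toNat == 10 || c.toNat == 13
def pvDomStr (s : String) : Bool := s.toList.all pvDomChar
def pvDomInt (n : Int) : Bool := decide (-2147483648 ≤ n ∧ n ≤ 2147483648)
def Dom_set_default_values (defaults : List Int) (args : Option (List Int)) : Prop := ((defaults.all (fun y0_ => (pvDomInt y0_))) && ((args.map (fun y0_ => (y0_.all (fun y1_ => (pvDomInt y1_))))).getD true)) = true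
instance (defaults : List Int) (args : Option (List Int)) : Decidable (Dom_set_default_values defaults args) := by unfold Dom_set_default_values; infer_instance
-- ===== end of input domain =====

-- B replaces A's per-index overwrite/append loop by the closed form list(args) + defaults[len(args):] (simpler decomposition; no speed claim).
-- ===== PORT A =====
-- loop: for i, arg in enumerate(args): result[i] = arg if i < len(result) else append
def setDefLoop : List Int → Nat → List Int → List Int
  | [], _, res => res
  | x :: xs, i, res =>
      setDefLoop xs (i + 1) (if (i : Int) < (res.length : Int) then res.set i x else res ++ [x])

def set_default_values (defaults : List Int) (args : Option (List Int)) : List Int :=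
  let a := match args with | none => [] | some l => l
  let result := defaults
  setDefLoop a 0 result

-- ===== PORT B =====
-- B: list(args) + defaults[len(args):]
def set_default_values_alt (defaults : List Int) (args : Option (List Int)) : List Int :=
  let a := match args with | none => [] | some l => l
  a ++ PySem.List.slice defaults (some (a.length : Int)) none

-- ===== PRECONDITION & SPEC =====
def Spec_set_default_values (defaults : List Int) (args : Option (List Int)) (out : List Int) : Prop := out = set_default_values_alt defaults args
instance (defaults : List Int) (args : Option (List Int)) (out : List Int) : Decidable (Spec_set_default_values defaults args out) := by unfold Spec_set_default_values; infer_instance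

-- ===== CLAIM (what is proved, stated in full; the proofs are below) =====
def Claim_equal_set_default_values : Prop := ∀ (defaults : List Int) (args : Option (List Int)), Dom_set_default_values defaults args → Spec_set_default_values defaults args (set_default_values defaults args)


-- loop invariant: once i ≤ |res|, the loop overwrites the prefix from i and appends past the end
theorem setDefLoop_eq (xs : List Int) : ∀ (i : Nat) (res : List Int), i ≤ res.length →
    setDefLoop xs i res = res.take i ++ xs ++ res.drop (i + xs.length) := by
  induction xs with
  | nil => intro i res _; simp [setDefLoop]
  | cons x xs ih =>
    intro i res hi
    by_cases h : i < res.length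
    · have hlen : (List.take i res).length = i := by simp; omega
      rw [setDefLoop, if_pos (by exact_mod_cast h),
          List.set_eq_take_cons_drop x h,
          ih (i + 1) _ (by simp [List.length_take]; omega),
          List.take_append, List.drop_append]
      have e1 : List.take (i + 1) (List.take i res) = List.take i res := by
        rw [List.take_take, Nat.min_eq_right (Nat.le_succ i)]
      have e2 : List.drop (i + 1 + xs.length) (List.take i res) = [] :=
        List.drop_eq_nil_of_le (by rw [hlen]; omega)
      simp [e1, e2]
      have g1 : i + 1 - i = 1 := by omega
      have g2 : i + 1 + xs.length - i = xs.length + 1 := by omega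
      have g3 : i + 1 + xs.length = i + (xs.length + 1) := by omega
      rw [Nat.min_eq_left hi, g1, g2, List.drop_succ_cons, List.drop_drop, g3,
          List.take_succ_cons, List.take_zero, List.singleton_append]
    · have hi' : i = res.length := le_antisymm hi (Nat.le_of_not_lt h)
      subst hi'
      rw [setDefLoop, if_neg (by exact_mod_cast h),
          ih (res.length + 1) (res ++ [x]) (by simp)]
      have f1 : List.take (res.length + 1) (res ++ [x]) = res ++ [x] :=
        List.take_of_length_le (by simp)
      have f2 : List.drop (res.length + 1 + xs.length) (res ++ [x]) = [] :=
        List.drop_eq_nil_of_le (by simp)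
      have f3 : List.drop (res.length + (xs.length + 1)) res = [] :=
        List.drop_eq_nil_of_le (by omega)
      simp [f1, f2, f3]

-- ===== VERDICT (by name: the statement is the Claim_ definition above) =====
theorem set_default_values_spec : Claim_equal_set_default_values := by
  intro defaults args _
  unfold Spec_set_default_values set_default_values set_default_values_alt
  cases args with
  | none =>
      simp [setDefLoop_eq [] 0 defaults (Nat.zero_le _)]
  | some a =>
      simp only
      rw [setDefLoop_eq a 0 defaults (Nat.zero_le _), PySem.List.slice_from_natCast]
      simp
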